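-- pv_equiv track=rewrite | github.com/jasonj2333/Python_SPP | informatykaEuropejczyka/Rozdzial2/prog2_37.py | szyfruj
-- ===== SOURCE A (Python) =====
-- def szyfruj (tekst):
--     wynik=''
--     dl=len(tekst)
--     for i in range(0,dl,4):
--         wynik+=tekst[i]
--     for i in range(1,dl,2):
--         wynik+=tekst[i]
--     for i in range(2,dl,4):
--         wynik+=tekst[i]
--     return wynik
-- ===== SOURCE B (Python) =====
-- def szyfruj(tekst):
--     first = []
--     second = []
--     third = []
--     for i, ch in enumerate(tekst):
--         r = i % 4
--         if r == 0:
--             first.append(ch)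
--         elif r == 2:
--             third.append(ch)
--         else:
--             second.append(ch)
--     return ''.join(first) + ''.join(second) + ''.join(third)
-- ===== Notes on version B (the rewrite author's own statement) =====
-- stated objective: alternative
-- what changed: Replaces A's three strided range(start, len, step) index loops (each re-scanning the string) by a single left-to-right enumerate pass that partitions characters into three buckets by i % 4 and joins them.
import Mathlib
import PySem

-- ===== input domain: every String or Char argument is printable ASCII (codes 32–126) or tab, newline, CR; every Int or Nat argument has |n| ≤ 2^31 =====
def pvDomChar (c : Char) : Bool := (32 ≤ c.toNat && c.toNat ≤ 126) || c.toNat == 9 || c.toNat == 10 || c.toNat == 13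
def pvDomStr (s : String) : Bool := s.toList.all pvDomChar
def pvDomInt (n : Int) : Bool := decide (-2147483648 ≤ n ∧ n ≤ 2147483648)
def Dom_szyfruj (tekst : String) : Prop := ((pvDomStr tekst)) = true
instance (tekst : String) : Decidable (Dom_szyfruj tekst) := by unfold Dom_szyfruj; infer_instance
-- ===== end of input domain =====

-- B replaces A's three strided index loops by one sequential enumerate pass that
-- partitions characters into three buckets by i % 4 (alternative decomposition, same cost).

-- ===== PORT A =====
-- A builds the cipher with three range(start, dl, step) loops over indices,
-- appending tekst[i]; the accumulator is modelled as a List Char, joined at the end.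
def szyfruj (tekst : String) : String :=
  let cs := tekst.toList
  let wynik : List Char := []
  let dl : Int := PySem.Str.len tekst
  let wynik := (PySem.List.pyRange 0 dl 4).foldl (fun w i => w ++ [PySem.List.pyGetD cs i ' ']) wynik
  let wynik := (PySem.List.pyRange 1 dl 2).foldl (fun w i => w ++ [PySem.List.pyGetD cs i ' ']) wynik
  let wynik := (PySem.List.pyRange 2 dl 4).foldl (fun w i => w ++ [PySem.List.pyGetD cs i ' ']) wynik
  String.ofList wynik
-- (every index produced by range(a, dl, step) is in range, so pyGetD is exact here)

-- ===== PORT B =====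
-- one step of B's classifying loop: r = i % 4; r == 0 → first, r == 2 → third, else second
def szyfrujStep (g : List Char × List Char × List Char) (p : Int × Char) :
    List Char × List Char × List Char :=
  let r := PySem.Int.mod p.1 4
  if r == 0 then (g.1 ++ [p.2], g.2.1, g.2.2)
  else if r == 2 then (g.1, g.2.1, g.2.2 ++ [p.2])
  else (g.1, g.2.1 ++ [p.2], g.2.2)

def szyfruj_alt (tekst : String) : String :=
  let g := (PySem.List.enumerate tekst.toList).foldl szyfrujStep ([], [], [])
  String.ofList (g.1 ++ g.2.1 ++ g.2.2)

-- ===== PRECONDITION & SPEC =====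
def Spec_szyfruj (tekst : String) (out : String) : Prop := out = szyfruj_alt tekst
instance (tekst : String) (out : String) : Decidable (Spec_szyfruj tekst out) := by unfold Spec_szyfruj; infer_instance

-- ===== CLAIM (what is proved, stated in full; the proofs are below) =====
def Claim_equal_szyfruj : Prop := ∀ (tekst : String), Dom_szyfruj tekst → Spec_szyfruj tekst (szyfruj tekst)

-- ===== LEMMAS AND PROOFS =====

-- elements of cs at indices r, r+m, r+2m, …
def pick (r m : Nat) : List Char → List Char
  | [] => []
  | c :: t => if r = 0 then c :: pick (m-1) m t else pick (r-1) m t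

lemma pick_cons (r m : Nat) (c : Char) (t : List Char) :
    pick r m (c :: t) = if r = 0 then c :: pick (m-1) m t else pick (r-1) m t := rfl

-- A's strided extraction, phrased over Nat, equals pick
lemma strided (m : Nat) (hm : 0 < m) (cs : List Char) : ∀ a : Nat,
    (List.range (if a < cs.length then (cs.length - a + m - 1)/m else 0)).map
      (fun k => cs.getD (a + m*k) ' ') = pick a m cs := by
  induction cs with
  | nil => intro a; simp [pick]
  | cons c t ih =>
    intro a
    cases a with
    | zero =>
      have hcount : (if 0 < (c::t).length then ((c::t).length - 0 + m - 1)/m else 0)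
          = (if m - 1 < t.length then (t.length - (m-1) + m - 1)/m else 0) + 1 := by
        simp only [List.length_cons, if_pos (Nat.succ_pos _)]
        rw [show t.length + 1 - 0 + m - 1 = t.length + m by omega, Nat.add_div_right _ hm]
        split_ifs with h
        · rw [show t.length - (m-1) + m - 1 = t.length from by omega]
        · rw [Nat.div_eq_of_lt (by omega)]
      rw [hcount, List.range_succ_eq_map, List.map_cons, List.map_map]
      simp only [Nat.mul_zero, Nat.add_zero, List.getD_cons_zero, pick_cons]
      congr 1
      rw [← ih (m-1)]
      apply List.map_congr_left
      intro k _
      simp only [Function.comp]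
      rw [show 0 + m * (k+1) = ((m-1) + m*k) + 1 by rw [Nat.mul_succ]; omega,
        List.getD_cons_succ]
    | succ a =>
      have hcount : (if a+1 < (c::t).length then ((c::t).length - (a+1) + m - 1)/m else 0)
          = (if a < t.length then (t.length - a + m - 1)/m else 0) := by
        simp only [List.length_cons]
        split_ifs with h1 h2 <;> first | omega | (congr 1; omega)
      rw [hcount, pick_cons, if_neg (Nat.succ_ne_zero a)]
      simp only [Nat.add_sub_cancel]
      rw [← ih a]
      apply List.map_congr_left
      intro k _
      rw [show a + 1 + m*k = (a + m*k) + 1 by omega, List.getD_cons_succ]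

-- bridge from pyRange over Int to the Nat-level strided form
lemma rangeA (cs : List Char) (a m : Nat) (hm : 0 < m) :
    (PySem.List.pyRange (a : Int) (cs.length : Int) (m : Int)).map
      (fun i => PySem.List.pyGetD cs i ' ') = pick a m cs := by
  rw [PySem.List.pyRange_of_pos _ _ (by exact_mod_cast hm), List.map_map]
  rw [← strided m hm cs a]
  have hN : (if (a:Int) < (cs.length:Int) then
        (((cs.length:Int) - a + m - 1)/(m:Int)).toNat else 0)
      = (if a < cs.length then (cs.length - a + m - 1)/m else 0) := by
    split_ifs with h1 h2
    · rw [show ((cs.length:Int) - a + m - 1) = ((cs.length - a + m - 1 : Nat) : Int) by omega]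
      rw [← Int.natCast_div]
      exact Int.toNat_natCast _
    · omega
    · omega
    · rfl
  rw [hN]
  apply List.map_congr_left
  intro k _
  simp only [Function.comp]
  rw [show ((a:Int) + m * k) = ((a + m*k : Nat) : Int) by push_cast; ring]
  rw [PySem.List.pyGetD_natCast]

-- the triple-accumulator fold splits into three independent single-bucket folds
lemma foldl_step_split (l : List (Int × Char)) : ∀ (x y z : List Char),
    l.foldl szyfrujStep (x, y, z) =
      (l.foldl (fun acc p => if PySem.Int.mod p.1 4 == 0 then acc ++ [p.2] else acc) x,
       l.foldl (fun acc p => if PySem.Int.mod p.1 2 == 1 then acc ++ [p.2] else acc) y,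
       l.foldl (fun acc p => if PySem.Int.mod p.1 4 == 2 then acc ++ [p.2] else acc) z) := by
  induction l with
  | nil => intro x y z; rfl
  | cons p l ih =>
    intro x y z
    rw [List.foldl_cons, List.foldl_cons, List.foldl_cons, List.foldl_cons]
    have hstep : szyfrujStep (x, y, z) p =
        ((if PySem.Int.mod p.1 4 == 0 then x ++ [p.2] else x),
         (if PySem.Int.mod p.1 2 == 1 then y ++ [p.2] else y),
         (if PySem.Int.mod p.1 4 == 2 then z ++ [p.2] else z)) := by
      simp only [szyfrujStep, PySem.Int.mod, Int.fmod_eq_emod, beq_iff_eq]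
      split_ifs <;> simp_all <;> omega
    rw [hstep, ih]

-- B's bucket for i % 4 == 0, with general start s: countdown distance (4 - s % 4) % 4
lemma bucket0 (cs : List Char) : ∀ s : Nat,
    ((PySem.List.enumerate cs (s : Int)).filter
        (fun p => PySem.Int.mod p.1 4 == 0)).map Prod.snd = pick ((4 - s % 4) % 4) 4 cs := by
  induction cs with
  | nil => intro s; simp [PySem.List.enumerate_nil, pick]
  | cons c t ih =>
    intro s
    rw [PySem.List.enumerate_cons, List.filter_cons]
    have hmod : (PySem.Int.mod (s : Int) 4 == 0) = decide (s % 4 = 0) := by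
      simp only [PySem.Int.mod, Int.fmod_eq_emod]
      rw [Bool.eq_iff_iff]
      simp only [beq_iff_eq, decide_eq_true_eq]
      omega
    have ht : PySem.List.enumerate t ((s:Int) + 1) = PySem.List.enumerate t ((s+1 : Nat) : Int) := by
      push_cast; ring_nf
    rw [hmod, ht]
    by_cases h : s % 4 = 0
    · have hd : (4 - s % 4) % 4 = 0 := by omega
      have hd' : (4 - (s+1) % 4) % 4 = 4 - 1 := by omega
      rw [if_pos (by simp [h]), List.map_cons, ih (s+1), hd, hd', pick_cons, if_pos rfl]
    · have hd : ¬ (4 - s % 4) % 4 = 0 := by omega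
      have hd' : (4 - (s+1) % 4) % 4 = (4 - s % 4) % 4 - 1 := by omega
      rw [if_neg (by simp [h]), ih (s+1), hd', pick_cons, if_neg hd]

-- B's bucket for i % 2 == 1 (odd indices)
lemma bucket1 (cs : List Char) : ∀ s : Nat,
    ((PySem.List.enumerate cs (s : Int)).filter
        (fun p => PySem.Int.mod p.1 2 == 1)).map Prod.snd = pick ((3 - s % 2) % 2) 2 cs := by
  induction cs with
  | nil => intro s; simp [PySem.List.enumerate_nil, pick]
  | cons c t ih =>
    intro s
    rw [PySem.List.enumerate_cons, List.filter_cons]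
    have hmod : (PySem.Int.mod (s : Int) 2 == 1) = decide (s % 2 = 1) := by
      simp only [PySem.Int.mod, Int.fmod_eq_emod]
      rw [Bool.eq_iff_iff]
      simp only [beq_iff_eq, decide_eq_true_eq]
      omega
    have ht : PySem.List.enumerate t ((s:Int) + 1) = PySem.List.enumerate t ((s+1 : Nat) : Int) := by
      push_cast; ring_nf
    rw [hmod, ht]
    by_cases h : s % 2 = 1
    · have hd : (3 - s % 2) % 2 = 0 := by omega
      have hd' : (3 - (s+1) % 2) % 2 = 2 - 1 := by omega
      rw [if_pos (by simp [h]), List.map_cons, ih (s+1), hd, hd', pick_cons, if_pos rfl]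
    · have hd : ¬ (3 - s % 2) % 2 = 0 := by omega
      have hd' : (3 - (s+1) % 2) % 2 = (3 - s % 2) % 2 - 1 := by omega
      rw [if_neg (by simp [h]), ih (s+1), hd', pick_cons, if_neg hd]

-- B's bucket for i % 4 == 2
lemma bucket2 (cs : List Char) : ∀ s : Nat,
    ((PySem.List.enumerate cs (s : Int)).filter
        (fun p => PySem.Int.mod p.1 4 == 2)).map Prod.snd = pick ((6 - s % 4) % 4) 4 cs := by
  induction cs with
  | nil => intro s; simp [PySem.List.enumerate_nil, pick]
  | cons c t ih =>
    intro s
    rw [PySem.List.enumerate_cons, List.filter_cons]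
    have hmod : (PySem.Int.mod (s : Int) 4 == 2) = decide (s % 4 = 2) := by
      simp only [PySem.Int.mod, Int.fmod_eq_emod]
      rw [Bool.eq_iff_iff]
      simp only [beq_iff_eq, decide_eq_true_eq]
      omega
    have ht : PySem.List.enumerate t ((s:Int) + 1) = PySem.List.enumerate t ((s+1 : Nat) : Int) := by
      push_cast; ring_nf
    rw [hmod, ht]
    by_cases h : s % 4 = 2
    · have hd : (6 - s % 4) % 4 = 0 := by omega
      have hd' : (6 - (s+1) % 4) % 4 = 4 - 1 := by omega
      rw [if_pos (by simp [h]), List.map_cons, ih (s+1), hd, hd', pick_cons, if_pos rfl]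
    · have hd : ¬ (6 - s % 4) % 4 = 0 := by omega
      have hd' : (6 - (s+1) % 4) % 4 = (6 - s % 4) % 4 - 1 := by omega
      rw [if_neg (by simp [h]), ih (s+1), hd', pick_cons, if_neg hd]

-- instances of rangeA at the literal arguments A uses
lemma rangeA04 (cs : List Char) :
    (PySem.List.pyRange 0 (cs.length : Int) 4).map (fun i => PySem.List.pyGetD cs i ' ')
      = pick 0 4 cs := by
  have := rangeA cs 0 4 (by norm_num); simpa using this

lemma rangeA12 (cs : List Char) :
    (PySem.List.pyRange 1 (cs.length : Int) 2).map (fun i => PySem.List.pyGetD cs i ' ')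
      = pick 1 2 cs := by
  have := rangeA cs 1 2 (by norm_num); simpa using this

lemma rangeA24 (cs : List Char) :
    (PySem.List.pyRange 2 (cs.length : Int) 4).map (fun i => PySem.List.pyGetD cs i ' ')
      = pick 2 4 cs := by
  have := rangeA cs 2 4 (by norm_num); simpa using this

lemma szyfruj_eq_alt (tekst : String) : szyfruj tekst = szyfruj_alt tekst := by
  unfold szyfruj szyfruj_alt
  simp only [PySem.Str.len_eq]
  rw [foldl_step_split]
  simp only [PySem.List.foldl_append_if, PySem.List.foldl_append_singleton_eq_map,
    List.nil_append]
  rw [rangeA04, rangeA12, rangeA24]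
  have h0 := bucket0 tekst.toList 0
  have h1 := bucket1 tekst.toList 0
  have h2 := bucket2 tekst.toList 0
  rw [show ((4:Nat) - 0 % 4) % 4 = 0 from by norm_num] at h0
  rw [show ((3:Nat) - 0 % 2) % 2 = 1 from by norm_num] at h1
  rw [show ((6:Nat) - 0 % 4) % 4 = 2 from by norm_num] at h2
  simp only [Nat.cast_zero] at h0 h1 h2
  rw [h0, h1, h2]

-- ===== VERDICT (by name: the statement is the Claim_ definition above) =====
theorem szyfruj_spec : Claim_equal_szyfruj := by
  intro tekst _
  unfold Spec_szyfruj
  exact szyfruj_eq_alt tekst
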